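-- pv_equiv track=rewrite | github.com/khanjason/leetcode | 1452.py | peopleIndexes
-- ===== SOURCE A (Python) =====
-- from typing import List
--
-- def peopleIndexes(favoriteCompanies: List[List[str]]) -> List[int]:
--     favset=[]
--     inds=[]
--     for f in favoriteCompanies:
--         favset.append(set(f))
--     for i in range(0,len(favset)):
--         for t in range(0,len(favset)):
--             if t==(len(favset)-1):
--                 if (favset[i].issubset(favset[t]))==False or i==t:
--
--                     inds.append(i)
--             elif favset[i].issubset(favset[t]) and i!=t:
--
--                 break
--     return inds
-- ===== SOURCE B (Python) =====
-- def peopleIndexes(favoriteCompanies):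
--     # Inverted index: company -> set of indices of people who like it.
--     n = len(favoriteCompanies)
--     index = {}
--     for i, f in enumerate(favoriteCompanies):
--         for c in set(f):
--             index.setdefault(c, set()).add(i)
--     res = []
--     for i, f in enumerate(favoriteCompanies):
--         inter = set(range(n))
--         for c in set(f):
--             inter &= index[c]
--         if len(inter) == 1:
--             res.append(i)
--     return res
-- ===== Notes on version B (the rewrite author's own statement) =====
-- stated objective: alternative
-- what changed: A tests every ordered pair of people with a set-subset check inside a break-on-first-superset scan; B instead builds an inverted index (company -> set of people who like it) once and keeps person i iff the intersection of the posting lists of i's companies is exactly {i}.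
import Mathlib
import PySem

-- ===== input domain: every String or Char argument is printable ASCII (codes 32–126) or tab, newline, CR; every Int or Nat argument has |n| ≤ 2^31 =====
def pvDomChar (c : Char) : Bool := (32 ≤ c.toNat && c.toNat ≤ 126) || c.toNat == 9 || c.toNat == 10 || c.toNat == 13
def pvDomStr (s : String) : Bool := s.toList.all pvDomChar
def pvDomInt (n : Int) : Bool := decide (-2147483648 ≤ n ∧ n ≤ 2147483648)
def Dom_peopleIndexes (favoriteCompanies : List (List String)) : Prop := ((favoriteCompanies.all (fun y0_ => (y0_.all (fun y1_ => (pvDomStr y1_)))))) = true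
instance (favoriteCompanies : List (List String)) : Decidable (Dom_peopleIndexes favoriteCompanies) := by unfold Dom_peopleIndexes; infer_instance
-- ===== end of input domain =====

-- B replaces A's pairwise subset scan by an inverted index (company -> set of likers)
-- and keeps person i iff the intersection of i's posting lists is exactly {i} (objective: alternative).

-- ===== PORT A =====
-- A's inner 'for t in range(0, len(favset))' loop; returning the current inds models 'break'.
def peopleIndexesInner (favset : List (PySem.Set String)) (n i : Int) :
    List Int → List Int → List Int
  | [], inds => inds
  | t :: ts, inds =>
    if t = n - 1 then
      if PySem.Set.issubset (PySem.List.pyGetD favset i PySem.Set.empty)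
            (PySem.List.pyGetD favset t PySem.Set.empty) = false ∨ i = t then
        peopleIndexesInner favset n i ts (inds ++ [i])
      else
        peopleIndexesInner favset n i ts inds
    else
      if PySem.Set.issubset (PySem.List.pyGetD favset i PySem.Set.empty)
            (PySem.List.pyGetD favset t PySem.Set.empty) = true ∧ i ≠ t then
        inds
      else
        peopleIndexesInner favset n i ts inds

def peopleIndexes (favoriteCompanies : List (List String)) : List Int :=
  let favset : List (PySem.Set String) :=
    favoriteCompanies.foldl (fun fs f => fs ++ [PySem.Set.ofList f]) []
  let n : Int := PySem.List.len favset
  (PySem.List.pyRange 0 n 1).foldl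
    (fun inds i => peopleIndexesInner favset n i (PySem.List.pyRange 0 n 1) inds) []

-- ===== PORT B =====
def peopleIndexes_alt (favoriteCompanies : List (List String)) : List Int :=
  let n : Int := PySem.List.len favoriteCompanies
  -- 'for c in set(f)' = fold over PySem.Set.ofList f; index.setdefault(c, set()).add(i) = modify c ∅ (·.add i)
  let index : PySem.Dict String (PySem.Set Int) :=
    (PySem.List.enumerate favoriteCompanies).foldl
      (fun d p => (PySem.Set.ofList p.2).foldl
        (fun d c => d.modify c PySem.Set.empty (fun s => PySem.Set.add s p.1)) d)
      PySem.Dict.empty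
  -- index[c] is always present here (c ∈ p.2), so getD is the exact lookup
  (PySem.List.enumerate favoriteCompanies).foldl
    (fun res p =>
      let inter : PySem.Set Int :=
        (PySem.Set.ofList p.2).foldl (fun inter c => PySem.Set.inter inter (index.getD c PySem.Set.empty))
          (PySem.Set.ofList (PySem.List.pyRange 0 n 1))
      if PySem.Set.len inter = 1 then res ++ [p.1] else res)
    []

-- ===== PRECONDITION & SPEC =====
def Spec_peopleIndexes (favoriteCompanies : List (List String)) (out : List Int) : Prop := out = peopleIndexes_alt favoriteCompanies
instance (favoriteCompanies : List (List String)) (out : List Int) : Decidable (Spec_peopleIndexes favoriteCompanies out) := by unfold Spec_peopleIndexes; infer_instance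

-- ===== CLAIM (what is proved, stated in full; the proofs are below) =====
def Claim_equal_peopleIndexes : Prop := ∀ (favoriteCompanies : List (List String)), Dom_peopleIndexes favoriteCompanies → Spec_peopleIndexes favoriteCompanies (peopleIndexes favoriteCompanies)

-- ===== LEMMAS AND PROOFS =====

-- the common characterisation: keep i iff no OTHER person's list contains all of i's companies
abbrev pvCond (fc : List (List String)) (i : Int) : Prop :=
  ∀ t ∈ PySem.List.pyRange 0 (fc.length : Int) 1, t ≠ i →
    ¬ (∀ c ∈ fc.getD i.toNat [], c ∈ fc.getD t.toNat [])

-- abbreviation used throughout the A-side lemmas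
abbrev pvSub (favset : List (PySem.Set String)) (i t : Int) : Prop :=
  PySem.Set.issubset (PySem.List.pyGetD favset i PySem.Set.empty)
    (PySem.List.pyGetD favset t PySem.Set.empty) = true

theorem pvInter_mem (idx : PySem.Dict String (PySem.Set Int)) (f : List String)
    (init : PySem.Set Int) (t : Int) :
    t ∈ f.foldl (fun s c => PySem.Set.inter s (idx.getD c PySem.Set.empty)) init ↔
      t ∈ init ∧ ∀ c ∈ f, t ∈ idx.getD c PySem.Set.empty := by
  induction f generalizing init with
  | nil => simp
  | cons c f ih =>
    simp only [List.foldl_cons, ih, PySem.Set.mem_inter, List.mem_cons]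
    constructor
    · rintro ⟨⟨h1, h2⟩, h3⟩
      exact ⟨h1, fun c' hc' => by rcases hc' with rfl | hc' <;> [exact h2; exact h3 c' hc']⟩
    · rintro ⟨h1, h2⟩
      exact ⟨⟨h1, h2 c (Or.inl rfl)⟩, fun c' hc' => h2 c' (Or.inr hc')⟩

theorem pvInter_nodup (idx : PySem.Dict String (PySem.Set Int)) (f : List String)
    (init : PySem.Set Int) (h : init.Nodup) :
    (f.foldl (fun s c => PySem.Set.inter s (idx.getD c PySem.Set.empty)) init).Nodup := by
  induction f generalizing init with
  | nil => simpa
  | cons c f ih => exact ih _ (PySem.Set.nodup_inter _ _ h)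

theorem pvIdx_inner_mem (f : List String) (i : Int)
    (d : PySem.Dict String (PySem.Set Int)) (c : String) (t : Int) :
    t ∈ (f.foldl (fun d c => d.modify c PySem.Set.empty (fun s => PySem.Set.add s i)) d).getD c PySem.Set.empty ↔
      t ∈ d.getD c PySem.Set.empty ∨ (t = i ∧ c ∈ f) := by
  induction f generalizing d with
  | nil => simp
  | cons c' f ih =>
    simp only [List.foldl_cons, ih, PySem.Dict.getD_modify, List.mem_cons]
    by_cases hc : c = c'
    · subst hc; simp [PySem.Set.mem_add]; tauto
    · simp [hc]

theorem pvIdx_mem (ps : List (Int × List String))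
    (d : PySem.Dict String (PySem.Set Int)) (c : String) (t : Int) :
    t ∈ (ps.foldl (fun d p => (PySem.Set.ofList p.2).foldl
          (fun d c => d.modify c PySem.Set.empty (fun s => PySem.Set.add s p.1)) d) d).getD c PySem.Set.empty ↔
      t ∈ d.getD c PySem.Set.empty ∨ ∃ p ∈ ps, t = p.1 ∧ c ∈ p.2 := by
  induction ps generalizing d with
  | nil => simp
  | cons p ps ih =>
    simp only [List.foldl_cons, ih, pvIdx_inner_mem, List.mem_cons, PySem.Set.mem_ofList]
    constructor
    · rintro (⟨h | h⟩ | h)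
      · exact Or.inl h
      · exact Or.inr ⟨p, Or.inl rfl, h⟩
      · obtain ⟨q, hq, h⟩ := h; exact Or.inr ⟨q, Or.inr hq, h⟩
    · rintro (h | ⟨q, rfl | hq, h⟩)
      · exact Or.inl (Or.inl h)
      · exact Or.inl (Or.inr h)
      · exact Or.inr ⟨q, hq, h⟩

theorem pvMem_enumerate {α : Type} (xs : List α) (s : Int) (p : Int × α) :
    p ∈ PySem.List.enumerate xs s ↔
      ∃ k : Nat, xs[k]? = some p.2 ∧ p.1 = s + k := by
  induction xs generalizing s with
  | nil => simp [PySem.List.enumerate]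
  | cons x xs ih =>
    rw [PySem.List.enumerate_cons, List.mem_cons, ih]
    constructor
    · rintro (rfl | ⟨k, hk, hp⟩)
      · exact ⟨0, by simp⟩
      · exact ⟨k + 1, by simpa using hk, by push_cast at hp ⊢; omega⟩
    · rintro ⟨k, hk, hp⟩
      cases k with
      | zero =>
        obtain ⟨p1, p2⟩ := p
        simp only [List.getElem?_cons_zero, Option.some.injEq] at hk
        left
        push_cast at hp
        simp [hk, hp]
      | succ k =>
        right
        exact ⟨k, by simpa using hk, by push_cast at hp ⊢; omega⟩

theorem pvMap_fst_enumerate {α : Type} (xs : List α) (s : Int) :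
    (PySem.List.enumerate xs s).map Prod.fst = PySem.List.pyRange s (s + xs.length) 1 := by
  induction xs generalizing s with
  | nil => simp [PySem.List.enumerate, PySem.List.pyRange_one_eq_nil]
  | cons x xs ih =>
    have hb : s + ((x :: xs).length : Int) = s + 1 + (xs.length : Int) := by
      push_cast [List.length_cons]; omega
    rw [PySem.List.enumerate_cons, List.map_cons, ih, hb]
    conv_rhs => rw [PySem.List.pyRange_one_cons (show s < s + 1 + (xs.length : Int) by omega)]

theorem pvInner_spec (favset : List (PySem.Set String)) (n i : Int)
    (us : List Int) (hus : ∀ t ∈ us, t ≠ n - 1) (inds : List Int) :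
    peopleIndexesInner favset n i (us ++ [n - 1]) inds =
      if ∃ t ∈ us, pvSub favset i t ∧ t ≠ i then inds
      else if ¬ pvSub favset i (n - 1) ∨ i = n - 1 then inds ++ [i] else inds := by
  induction us generalizing inds with
  | nil =>
    have hex : ¬ ∃ t ∈ ([] : List Int), pvSub favset i t ∧ t ≠ i := by simp
    rw [if_neg hex]
    simp only [List.nil_append, peopleIndexesInner]
    split_ifs <;> simp_all [pvSub]
    next h1 h2 => exact absurd ((PySem.Set.issubset_iff _ _).mpr h2.1) (by simp [h1])
  | cons t us ih =>
    have ht : t ≠ n - 1 := hus t (List.mem_cons_self)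
    have hus' : ∀ x ∈ us, x ≠ n - 1 := fun x hx => hus x (List.mem_cons_of_mem _ hx)
    by_cases hb : pvSub favset i t ∧ i ≠ t
    · have hex : ∃ x ∈ t :: us, pvSub favset i x ∧ x ≠ i :=
        ⟨t, List.mem_cons_self, hb.1, Ne.symm hb.2⟩
      simp only [List.cons_append, peopleIndexesInner, if_neg ht, if_pos hb, if_pos hex]
    · have hiff : (∃ x ∈ t :: us, pvSub favset i x ∧ x ≠ i) ↔
          (∃ x ∈ us, pvSub favset i x ∧ x ≠ i) := by
        constructor
        · rintro ⟨x, hx, hs, hxi⟩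
          rcases List.mem_cons.mp hx with rfl | hx'
          · exact absurd ⟨hs, Ne.symm hxi⟩ hb
          · exact ⟨x, hx', hs, hxi⟩
        · rintro ⟨x, hx, hs, hxi⟩
          exact ⟨x, List.mem_cons_of_mem _ hx, hs, hxi⟩
      simp only [List.cons_append, peopleIndexesInner, if_neg ht, if_neg hb, ih hus', hiff]

theorem pvSub_iff (fc : List (List String)) (i t : Int)
    (hi0 : 0 ≤ i) (hin : i < (fc.length : Int)) (ht0 : 0 ≤ t) (htn : t < (fc.length : Int)) :
    pvSub (fc.map PySem.Set.ofList) i t ↔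
      ∀ c ∈ fc.getD i.toNat [], c ∈ fc.getD t.toNat [] := by
  have hi' : i.toNat < fc.length := by omega
  have ht' : t.toNat < fc.length := by omega
  unfold pvSub
  rw [PySem.List.pyGetD_eq_getElem _ _ hi0 (by simpa using hin),
      PySem.List.pyGetD_eq_getElem _ _ ht0 (by simpa using htn)]
  simp [PySem.Set.issubset_iff, PySem.Set.mem_ofList,
    List.getElem?_eq_getElem hi', List.getElem?_eq_getElem ht']

theorem pvCondA_iff (fc : List (List String)) (i : Int)
    (hi0 : 0 ≤ i) (hin : i < (fc.length : Int)) :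
    pvCond fc i ↔
      (¬ ∃ t ∈ PySem.List.pyRange 0 ((fc.length : Int) - 1) 1,
          pvSub (fc.map PySem.Set.ofList) i t ∧ t ≠ i) ∧
        (¬ pvSub (fc.map PySem.Set.ofList) i ((fc.length : Int) - 1) ∨
          i = (fc.length : Int) - 1) := by
  constructor
  · intro h
    refine ⟨?_, ?_⟩
    · rintro ⟨t, ht, hsub, hti⟩
      rw [PySem.List.mem_pyRange_one] at ht
      exact h t (PySem.List.mem_pyRange_one.mpr ⟨ht.1, by omega⟩) hti
        ((pvSub_iff fc i t hi0 hin ht.1 (by omega)).mp hsub)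
    · by_cases hi : i = (fc.length : Int) - 1
      · exact Or.inr hi
      · refine Or.inl fun hsub => ?_
        exact h _ (PySem.List.mem_pyRange_one.mpr ⟨by omega, by omega⟩) (by omega)
          ((pvSub_iff fc i _ hi0 hin (by omega) (by omega)).mp hsub)
  · rintro ⟨h1, h2⟩ t ht hti hall
    rw [PySem.List.mem_pyRange_one] at ht
    by_cases hlast : t = (fc.length : Int) - 1
    · subst hlast
      rcases h2 with h2 | h2
      · exact h2 ((pvSub_iff fc i _ hi0 hin ht.1 ht.2).mpr hall)
      · exact hti h2.symm
    · exact h1 ⟨t, PySem.List.mem_pyRange_one.mpr ⟨ht.1, by omega⟩,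
        (pvSub_iff fc i t hi0 hin ht.1 ht.2).mpr hall, hti⟩

theorem pvA_eq_filter (fc : List (List String)) :
    peopleIndexes fc =
      (PySem.List.pyRange 0 (fc.length : Int) 1).filter (fun i => decide (pvCond fc i)) := by
  have hfav : fc.foldl (fun fs f => fs ++ [PySem.Set.ofList f]) ([] : List (PySem.Set String))
      = fc.map PySem.Set.ofList := by
    simpa using PySem.List.foldl_append_singleton_eq_map
      (f := fun f => PySem.Set.ofList f) (l := fc) (acc := [])
  simp only [peopleIndexes, hfav, PySem.List.len_eq, List.length_map]
  rw [PySem.List.foldl_congr_mem _ _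
    (fun inds i => if pvCond fc i then inds ++ [i] else inds) _ ?_]
  · exact PySem.List.foldl_append_ite_eq_filter (pvCond fc) _ []
  · intro acc x hx
    have hx' := PySem.List.mem_pyRange_one.mp hx
    beta_reduce
    have hsplit : PySem.List.pyRange 0 (fc.length : Int) 1
        = PySem.List.pyRange 0 ((fc.length : Int) - 1) 1 ++ [(fc.length : Int) - 1] := by
      have h := PySem.List.pyRange_one_succ_right
        (a := (0 : Int)) (b := (fc.length : Int) - 1) (by omega)
      simpa using h
    conv_lhs => rw [hsplit]
    rw [pvInner_spec _ _ _ _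
      (fun t ht => by have := PySem.List.mem_pyRange_one.mp ht; omega) acc]
    have hiff := pvCondA_iff fc x hx'.1 hx'.2
    by_cases hc : pvCond fc x
    · rw [if_neg (hiff.mp hc).1, if_pos (hiff.mp hc).2, if_pos hc]
    · rw [if_neg hc]
      by_cases hE : ∃ t ∈ PySem.List.pyRange 0 ((fc.length : Int) - 1) 1,
          pvSub (fc.map PySem.Set.ofList) x t ∧ t ≠ x
      · rw [if_pos hE]
      · rw [if_neg hE, if_neg (fun hL => hc (hiff.mpr ⟨hE, hL⟩))]

theorem pvLen_one {l : List Int} {i : Int} (hi : i ∈ l) (hn : l.Nodup) :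
    PySem.Set.len l = 1 ↔ ∀ t ∈ l, t = i := by
  have hlen : PySem.Set.len l = (l.length : Int) := by simp [PySem.Set.len]
  rw [hlen]
  constructor
  · intro h t ht
    have h1 : l.length = 1 := by exact_mod_cast h
    obtain ⟨a, rfl⟩ := List.length_eq_one_iff.mp h1
    simp only [List.mem_singleton] at hi ht
    omega
  · intro h
    cases l with
    | nil => cases hi
    | cons a l' =>
      have ha : a = i := h a (List.mem_cons_self)
      cases l' with
      | nil => simp
      | cons b l'' =>
        have hb : b = i := h b (by simp)
        rw [List.nodup_cons] at hn
        exact absurd (by simp [ha, hb]) hn.1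

theorem pvB_eq_filter (fc : List (List String)) :
    peopleIndexes_alt fc =
      (PySem.List.pyRange 0 (fc.length : Int) 1).filter (fun i => decide (pvCond fc i)) := by
  simp only [peopleIndexes_alt, PySem.List.len_eq]
  have hidx : ∀ (c : String) (t : Int),
      t ∈ ((PySem.List.enumerate fc).foldl (fun d p => (PySem.Set.ofList p.2).foldl
            (fun d c => d.modify c PySem.Set.empty (fun s => PySem.Set.add s p.1)) d)
          PySem.Dict.empty).getD c PySem.Set.empty ↔
        (0 ≤ t ∧ t < (fc.length : Int) ∧ c ∈ fc.getD t.toNat []) := by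
    intro c t
    rw [pvIdx_mem]
    simp only [PySem.Dict.getD_empty]
    constructor
    · rintro (h | ⟨p, hp, rfl, hc⟩)
      · cases h
      · obtain ⟨k, hk, hp1⟩ := (pvMem_enumerate fc 0 p).mp hp
        have hk' : k < fc.length := (List.getElem?_eq_some_iff.mp hk).1
        have hv : fc[k] = p.2 := (List.getElem?_eq_some_iff.mp hk).2
        refine ⟨by omega, by omega, ?_⟩
        have : p.1.toNat = k := by omega
        rw [this, List.getD_eq_getElem _ _ hk', hv]
        exact hc
    · rintro ⟨h0, hnn, hc⟩
      have hk' : t.toNat < fc.length := by omega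
      refine Or.inr ⟨(t, fc.getD t.toNat []), (pvMem_enumerate fc 0 _).mpr
        ⟨t.toNat, ?_, by simp; omega⟩, rfl, hc⟩
      rw [List.getElem?_eq_some_iff]
      exact ⟨hk', (List.getD_eq_getElem _ _ hk').symm⟩
  rw [PySem.List.foldl_congr_mem _ _
    (fun res (p : Int × List String) => if pvCond fc p.1 then res ++ [p.1] else res) _ ?_]
  · rw [PySem.List.foldl_append_ite
      (p := fun p : Int × List String => pvCond fc p.1) (f := Prod.fst)]
    have hmap : (PySem.List.enumerate fc).map Prod.fst
        = PySem.List.pyRange 0 (fc.length : Int) 1 := by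
      have h := pvMap_fst_enumerate fc 0
      simpa using h
    have hcomp : (fun p : Int × List String => decide (pvCond fc p.1))
        = ((fun i => decide (pvCond fc i)) ∘ Prod.fst) := rfl
    rw [List.nil_append, hcomp, ← List.filter_map, hmap]
  · intro acc p hp
    obtain ⟨k, hk, hp1⟩ := (pvMem_enumerate fc 0 p).mp hp
    have hk' : k < fc.length := (List.getElem?_eq_some_iff.mp hk).1
    have hv : fc[k] = p.2 := (List.getElem?_eq_some_iff.mp hk).2
    have hp0 : 0 ≤ p.1 := by omega
    have hpn : p.1 < (fc.length : Int) := by omega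
    have hp2 : p.2 = fc.getD p.1.toNat [] := by
      have : p.1.toNat = k := by omega
      rw [this, List.getD_eq_getElem _ _ hk', hv]
    have hinit : PySem.Set.ofList (PySem.List.pyRange 0 (fc.length : Int) 1)
        = PySem.List.pyRange 0 (fc.length : Int) 1 :=
      PySem.Set.ofList_eq_self_of_nodup _ (PySem.List.nodup_pyRange_one _ _)
    have hmem : ∀ t : Int,
        t ∈ (PySem.Set.ofList p.2).foldl (fun s c => PySem.Set.inter s
            (PySem.Dict.getD ((PySem.List.enumerate fc).foldl (fun d q => (PySem.Set.ofList q.2).foldl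
              (fun d c => d.modify c PySem.Set.empty (fun s => PySem.Set.add s q.1)) d)
              PySem.Dict.empty) c PySem.Set.empty))
          (PySem.Set.ofList (PySem.List.pyRange 0 (fc.length : Int) 1)) ↔
        (0 ≤ t ∧ t < (fc.length : Int) ∧
          ∀ c ∈ fc.getD p.1.toNat [], c ∈ fc.getD t.toNat []) := by
      intro t
      rw [pvInter_mem, hinit, PySem.List.mem_pyRange_one]
      constructor
      · rintro ⟨⟨ht0, htn⟩, hall⟩
        refine ⟨ht0, htn, fun c hc => ?_⟩
        have := (hidx c t).mp (hall c ((PySem.Set.mem_ofList _ _).mpr (by rwa [← hp2] at hc)))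
        exact this.2.2
      · rintro ⟨ht0, htn, hall⟩
        refine ⟨⟨ht0, htn⟩, fun c hc => (hidx c t).mpr ⟨ht0, htn, ?_⟩⟩
        exact hall c (by have := (PySem.Set.mem_ofList p.2 c).mp hc; rwa [hp2] at this)
    have hself : p.1 ∈ (PySem.Set.ofList p.2).foldl (fun s c => PySem.Set.inter s
            (PySem.Dict.getD ((PySem.List.enumerate fc).foldl (fun d q => (PySem.Set.ofList q.2).foldl
              (fun d c => d.modify c PySem.Set.empty (fun s => PySem.Set.add s q.1)) d)
              PySem.Dict.empty) c PySem.Set.empty))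
          (PySem.Set.ofList (PySem.List.pyRange 0 (fc.length : Int) 1)) :=
      (hmem p.1).mpr ⟨hp0, hpn, fun c hc => hc⟩
    have hnodup := pvInter_nodup ((PySem.List.enumerate fc).foldl (fun d q => (PySem.Set.ofList q.2).foldl
              (fun d c => d.modify c PySem.Set.empty (fun s => PySem.Set.add s q.1)) d)
              PySem.Dict.empty) (PySem.Set.ofList p.2) _
      (hinit ▸ PySem.List.nodup_pyRange_one 0 (fc.length : Int))
    have hcond : PySem.Set.len ((PySem.Set.ofList p.2).foldl (fun s c => PySem.Set.inter s
            (PySem.Dict.getD ((PySem.List.enumerate fc).foldl (fun d q => (PySem.Set.ofList q.2).foldl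
              (fun d c => d.modify c PySem.Set.empty (fun s => PySem.Set.add s q.1)) d)
              PySem.Dict.empty) c PySem.Set.empty))
          (PySem.Set.ofList (PySem.List.pyRange 0 (fc.length : Int) 1))) = 1 ↔
        pvCond fc p.1 := by
      rw [pvLen_one hself hnodup]
      constructor
      · intro h t ht hti hall
        have ht' := PySem.List.mem_pyRange_one.mp ht
        exact hti (h t ((hmem t).mpr ⟨ht'.1, ht'.2, hall⟩))
      · intro h t ht
        have := (hmem t).mp ht
        by_contra hne
        exact h t (PySem.List.mem_pyRange_one.mpr ⟨this.1, this.2.1⟩) hne this.2.2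
    beta_reduce
    by_cases hc : pvCond fc p.1
    · rw [if_pos (hcond.mpr hc), if_pos hc]
    · rw [if_neg (fun h => hc (hcond.mp h)), if_neg hc]

-- ===== VERDICT (by name: the statement is the Claim_ definition above) =====
theorem peopleIndexes_spec : Claim_equal_peopleIndexes := by
  intro fc _
  unfold Spec_peopleIndexes
  rw [pvA_eq_filter, pvB_eq_filter]
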